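-- pv_equiv track=rewrite | github.com/Shuaib-Tabit1/Telemetry-Refactoring-Agent | telemetry-scanner/scanner/validation_framework.py | _is_valid_unified_diff
-- ===== SOURCE A (Python) =====
-- def _is_valid_unified_diff(patch: str) -> bool:
--     """Check if the patch is a valid unified diff."""
--     if not patch:
--         return False
--
--     lines = patch.split('\n')
--     has_header = any(line.startswith('---') or line.startswith('+++') for line in lines)
--     has_hunks = any(line.startswith('@@') for line in lines)
--     has_changes = any(line.startswith('+') or line.startswith('-') for line in lines if not line.startswith('+++') and not line.startswith('---'))
--
--     return has_header and has_hunks and has_changes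
-- ===== SOURCE B (Python) =====
-- def _is_valid_unified_diff(patch: str) -> bool:
--     """Check if the patch is a valid unified diff (single-pass flag scan)."""
--     if not patch:
--         return False
--     has_header = has_hunks = has_changes = False
--     for line in patch.split('\n'):
--         if line.startswith('---') or line.startswith('+++'):
--             has_header = True
--         elif line.startswith('@@'):
--             has_hunks = True
--         elif line.startswith('+') or line.startswith('-'):
--             has_changes = True
--         if has_header and has_hunks and has_changes:
--             return True
--     return False
-- ===== Notes on version B (the rewrite author's own statement) =====
-- stated objective: alternative
-- what changed: Replaces A's three independent any()/generator scans over the line list with a single loop maintaining three flags (with early return once all are set), so the lines are traversed once instead of up to three times.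
import Mathlib
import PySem

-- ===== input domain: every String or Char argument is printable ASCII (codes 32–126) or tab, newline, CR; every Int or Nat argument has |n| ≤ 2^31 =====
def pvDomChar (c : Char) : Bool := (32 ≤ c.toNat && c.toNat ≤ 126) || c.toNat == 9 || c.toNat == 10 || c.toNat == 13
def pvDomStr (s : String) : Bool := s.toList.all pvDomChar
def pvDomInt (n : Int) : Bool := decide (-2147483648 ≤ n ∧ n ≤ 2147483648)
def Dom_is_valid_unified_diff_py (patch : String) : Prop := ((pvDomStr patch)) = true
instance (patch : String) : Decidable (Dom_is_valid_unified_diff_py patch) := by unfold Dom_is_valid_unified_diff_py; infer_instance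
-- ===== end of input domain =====

-- B replaces A's three separate any() scans over the lines with one single-pass
-- loop maintaining three flags (alternative decomposition, same asymptotic cost).


-- ===== PORT A =====
def is_valid_unified_diff_py (patch : String) : Bool :=
  if patch == "" then false
  else
    let lines := (PySem.Str.split? patch "\n").getD []
    let has_header := lines.any (fun line =>
      PySem.Str.startswith line "---" || PySem.Str.startswith line "+++")
    let has_hunks := lines.any (fun line => PySem.Str.startswith line "@@")
    let has_changes := (lines.filter (fun line =>
      !PySem.Str.startswith line "+++" && !PySem.Str.startswith line "---")).any
      (fun line => PySem.Str.startswith line "+" || PySem.Str.startswith line "-")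
    has_header && has_hunks && has_changes

-- ===== PORT B =====
-- single pass over the lines with three flags and early return (Source B's loop)
def pvDiffScan : List String → Bool → Bool → Bool → Bool
  | [], _, _, _ => false
  | line :: rest, has_header, has_hunks, has_changes =>
    let st :=
      if PySem.Str.startswith line "---" || PySem.Str.startswith line "+++" then
        (true, has_hunks, has_changes)
      else if PySem.Str.startswith line "@@" then
        (has_header, true, has_changes)
      else if PySem.Str.startswith line "+" || PySem.Str.startswith line "-" then
        (has_header, has_hunks, true)
      else (has_header, has_hunks, has_changes)
    if st.1 && st.2.1 && st.2.2 then true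
    else pvDiffScan rest st.1 st.2.1 st.2.2

def is_valid_unified_diff_py_alt (patch : String) : Bool :=
  if patch == "" then false
  else pvDiffScan ((PySem.Str.split? patch "\n").getD []) false false false

-- ===== PRECONDITION & SPEC =====
def Spec_is_valid_unified_diff_py (patch : String) (out : Bool) : Prop := out = is_valid_unified_diff_py_alt patch
instance (patch : String) (out : Bool) : Decidable (Spec_is_valid_unified_diff_py patch out) := by unfold Spec_is_valid_unified_diff_py; infer_instance

-- ===== CLAIM (what is proved, stated in full; the proofs are below) =====
def Claim_equal_is_valid_unified_diff_py : Prop := ∀ (patch : String), Dom_is_valid_unified_diff_py patch → Spec_is_valid_unified_diff_py patch (is_valid_unified_diff_py patch)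

-- ===== LEMMAS AND PROOFS =====

-- the three per-line predicates of A
def pvH (l : String) : Bool :=
  PySem.Str.startswith l "---" || PySem.Str.startswith l "+++"
def pvK (l : String) : Bool := PySem.Str.startswith l "@@"
def pvC (l : String) : Bool :=
  (!PySem.Str.startswith l "+++" && !PySem.Str.startswith l "---") &&
  (PySem.Str.startswith l "+" || PySem.Str.startswith l "-")

-- two prefixes with different first characters cannot both hold
theorem pv_sw_disj (cs : List Char) (a b : Char) (ps qs : List Char) (hab : a ≠ b)
    (h : PySem.Chars.startswith cs (a :: ps) = true) :
    PySem.Chars.startswith cs (b :: qs) = false := by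
  rw [PySem.Chars.startswith_iff] at h
  by_contra hb
  rw [Bool.not_eq_false, PySem.Chars.startswith_iff] at hb
  cases cs with
  | nil => simp [List.prefix_nil] at h
  | cons c cs =>
    rw [List.cons_prefix_cons] at h hb
    exact hab (h.1.trans hb.1.symm)

theorem pvK_excl (l : String) (h : pvK l = true) :
    PySem.Str.startswith l "---" = false ∧ PySem.Str.startswith l "+++" = false ∧
    PySem.Str.startswith l "+" = false ∧ PySem.Str.startswith l "-" = false := by
  unfold pvK at h
  have h' : PySem.Chars.startswith l.toList ['@','@'] = true := by simpa using h
  refine ⟨?_, ?_, ?_, ?_⟩ <;> simp only [PySem.Str.startswith_eq] <;>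
    [exact pv_sw_disj _ '@' '-' _ _ (by decide) h';
     exact pv_sw_disj _ '@' '+' _ _ (by decide) h';
     exact pv_sw_disj _ '@' '+' _ _ (by decide) h';
     exact pv_sw_disj _ '@' '-' _ _ (by decide) h']

theorem pvH_exclK (l : String) (h : pvH l = true) : pvK l = false := by
  unfold pvH at h
  unfold pvK
  simp only [PySem.Str.startswith_eq]
  rcases Bool.or_eq_true_iff.mp h with h' | h'
  · exact pv_sw_disj _ '-' '@' _ _ (by decide) (by simpa using h')
  · exact pv_sw_disj _ '+' '@' _ _ (by decide) (by simpa using h')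

-- the single-pass loop computes the conjunction of the three any-scans
theorem pvDiffScan_eq (ls : List String) (h k c : Bool) (hn : (h && k && c) = false) :
    pvDiffScan ls h k c =
      ((h || ls.any pvH) && (k || ls.any pvK) && (c || ls.any pvC)) := by
  induction ls generalizing h k c with
  | nil => simp [pvDiffScan]; simpa using hn
  | cons l ls ih =>
    have key : pvDiffScan (l :: ls) h k c =
        (if (h || pvH l) && (k || pvK l) && (c || pvC l) then true
         else pvDiffScan ls (h || pvH l) (k || pvK l) (c || pvC l)) := by
      simp only [pvDiffScan]
      by_cases hH : pvH l = true
      · have hK := pvH_exclK l hH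
        have hC : pvC l = false := by
          unfold pvH at hH
          rcases Bool.or_eq_true_iff.mp hH with h' | h' <;>
            simp only [pvC, h', Bool.not_true, Bool.and_false, Bool.false_and]
        have hHs : (PySem.Str.startswith l "---" || PySem.Str.startswith l "+++") = true := hH
        simp only [hHs]
        simp [hH, hK, hC]
      · rw [Bool.not_eq_true] at hH
        have hHs : (PySem.Str.startswith l "---" || PySem.Str.startswith l "+++") = false := hH
        simp only [hHs]
        by_cases hK : pvK l = true
        · obtain ⟨e1, e2, e3, e4⟩ := pvK_excl l hK
          have hC : pvC l = false := by
            simp only [pvC, e3, e4, Bool.or_self, Bool.and_false]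
          have hKs : PySem.Str.startswith l "@@" = true := hK
          simp only [hKs]
          simp [hH, hK, hC]
        · rw [Bool.not_eq_true] at hK
          have hKs : PySem.Str.startswith l "@@" = false := hK
          simp only [hKs]
          by_cases hPM : (PySem.Str.startswith l "+" || PySem.Str.startswith l "-") = true
          · have hC : pvC l = true := by
              have hHf := hH
              unfold pvH at hHf
              simp only [Bool.or_eq_false_iff] at hHf
              simp only [pvC, hPM, hHf.1, hHf.2, Bool.not_false, Bool.and_true]
            simp only [hPM]
            simp [hH, hK, hC]
          · rw [Bool.not_eq_true] at hPM
            have hC : pvC l = false := by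
              simp only [pvC, hPM, Bool.and_false]
            simp only [hPM]
            simp [hH, hK, hC]
    rw [key]
    by_cases hall : ((h || pvH l) && (k || pvK l) && (c || pvC l)) = true
    · simp only [hall, if_true]
      simp only [List.any_cons]
      simp only [Bool.and_eq_true, Bool.or_eq_true_iff] at hall
      rcases hall with ⟨⟨h1, h2⟩, h3⟩
      rcases h1 with h1 | h1 <;> rcases h2 with h2 | h2 <;> rcases h3 with h3 | h3 <;>
        simp [h1, h2, h3]
    · rw [if_neg (by simpa using hall), ih _ _ _ (by simpa using hall)]
      simp [List.any_cons, Bool.or_assoc]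

-- A's filter-then-any equals one any over the combined predicate
theorem pv_filter_any (ls : List String) :
    ((ls.filter (fun line =>
      !PySem.Str.startswith line "+++" && !PySem.Str.startswith line "---")).any
      (fun line => PySem.Str.startswith line "+" || PySem.Str.startswith line "-"))
    = ls.any pvC := by
  induction ls with
  | nil => rfl
  | cons l ls ih =>
    rw [List.filter_cons]
    by_cases hp : (!PySem.Str.startswith l "+++" && !PySem.Str.startswith l "---") = true
    · simp only [hp, if_true, List.any_cons, ih, pvC, Bool.true_and]
    · rw [Bool.not_eq_true] at hp
      have hC : pvC l = false := by simp only [pvC, hp, Bool.false_and]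
      simp only [hp, Bool.false_eq_true, if_false, ih, List.any_cons, hC, Bool.false_or]

-- ===== VERDICT (by name: the statement is the Claim_ definition above) =====
theorem is_valid_unified_diff_py_spec : Claim_equal_is_valid_unified_diff_py := by
  intro patch _
  unfold Spec_is_valid_unified_diff_py
  unfold is_valid_unified_diff_py is_valid_unified_diff_py_alt
  by_cases hp : patch == ""
  · simp [hp]
  · simp only [hp, Bool.false_eq_true, if_false]
    rw [pvDiffScan_eq _ false false false rfl, pv_filter_any]
    simp only [Bool.false_or]
    rfl
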